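-- pv_equiv track=rewrite | github.com/SuccessPear/UPS-Programming | 25.11/ex1.py | frog_cross_river
-- ===== SOURCE A (Python) =====
-- def frog_cross_river(stones: list[int]):
--     # Create a stack
--     # Value in the stack will be in format (stone, step)
--     # Stone: the stone value itself
--     # Step: the number of step that the frog use to jump to the stone
--     stone_stack = []
--
--     # Append the first stone to the stack
--     stone_stack.append([0, 1])
--
--     # Loop until stack have no value
--     while(len(stone_stack) > 0):
--         stone, step = stone_stack.pop()
--
--         # Consider 3 possible case step-1, step, step+1
--         for i in [-1, 0, 1]:
--             # Check if there is a stone on each case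
--             if step + i > 0 and stone + step + i in stones:
--                 # If we reach the last stone, return True
--                 if stone + step + i == stones[-1]:
--                     return True
--
--                 # Add new (stone, step) to the stack
--                 stone_stack.append([stone+step+i, step+i])
--
--     # After the while loop and we still not reach the end stone,
--     # It means that the frog can't cross the river, so return False.
--     return False
-- ===== SOURCE B (Python) =====
-- def frog_cross_river(stones: list[int]):
--     # Fixed-point DP: saturate the set of reachable (stone, step) states in
--     # whole rounds (no stack/queue); succeed when a round's successors hit
--     # the last stone, fail when a round adds nothing new.
--     if not stones:
--         return False
--     target = stones[-1]
--     on_stone = set(stones)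
--     states = {(0, 1)}
--     while True:
--         succs = [(s + d, d)
--                  for (s, k) in states
--                  for d in (k - 1, k, k + 1)
--                  if d > 0 and s + d in on_stone]
--         if any(s == target for (s, d) in succs):
--             return True
--         fresh = [q for q in succs if q not in states]
--         if not fresh:
--             return False
--         states.update(fresh)
-- ===== Notes on version B (the rewrite author's own statement) =====
-- stated objective: alternative
-- what changed: Replaced A's unmemoized DFS stack with list-membership scans by a round-based fixed-point DP: grow the set of reachable (stone, step) states in whole rounds using set membership until a successor hits the last stone or saturation is reached.
import Mathlib
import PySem

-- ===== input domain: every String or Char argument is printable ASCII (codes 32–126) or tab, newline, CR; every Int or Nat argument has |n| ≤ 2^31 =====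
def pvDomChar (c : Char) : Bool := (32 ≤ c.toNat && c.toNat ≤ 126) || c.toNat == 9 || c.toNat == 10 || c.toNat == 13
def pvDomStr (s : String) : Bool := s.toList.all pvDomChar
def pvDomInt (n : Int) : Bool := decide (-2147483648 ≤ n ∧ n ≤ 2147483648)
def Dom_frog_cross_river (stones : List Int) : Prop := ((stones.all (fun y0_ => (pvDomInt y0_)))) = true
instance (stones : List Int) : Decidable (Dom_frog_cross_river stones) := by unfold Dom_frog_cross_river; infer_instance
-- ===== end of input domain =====

-- B replaces A's unmemoized DFS stack by a round-based fixed-point DP over the set of reachable (stone, step) states.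

-- ===== PORT A =====
-- Termination measure machinery for A's worklist loop: every pushed state
-- has a stone strictly greater (within the stone list) than the popped one.
def pvRank (l : List Int) (s : Int) : Nat := (l.filter (fun x => decide (s < x))).length

def pvMeasure (l : List Int) (stack : List (Int × Int)) : Nat :=
  (stack.map (fun p => 4 ^ pvRank l p.1)).sum

theorem pvRank_lt {l : List Int} {s x : Int} (hx : x ∈ l) (hs : s < x) :
    pvRank l x < pvRank l s := by
  induction l with
  | nil => cases hx
  | cons a as ih =>
    unfold pvRank at *
    have hsubl : (as.filter (fun y => decide (x < y))).length ≤ (as.filter (fun y => decide (s < y))).length := by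
      apply List.Sublist.length_le
      apply List.monotone_filter_right
      intro y hy
      simp only [decide_eq_true_eq] at hy ⊢
      omega
    rcases List.mem_cons.mp hx with rfl | hmem
    · simp only [List.filter_cons]
      rw [if_neg (by simp), if_pos (by simp [hs])]
      simp only [List.length_cons]
      omega
    · have := ih hmem
      by_cases hxa : x < a
      · have hsa : s < a := lt_trans hs hxa
        simp only [List.filter_cons]
        rw [if_pos (by simp [hxa]), if_pos (by simp [hsa])]
        simp only [List.length_cons]
        omega
      · by_cases hsa : s < a
        · simp only [List.filter_cons]
          rw [if_neg (by simp [hxa]), if_pos (by simp [hsa])]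
          simp only [List.length_cons]
          omega
        · simp only [List.filter_cons]
          rw [if_neg (by simp [hxa]), if_neg (by simp [hsa])]
          omega

theorem pvMeasure_step {l : List Int} {s : Int} {news : List (Int × Int)}
    (hlen : news.length ≤ 3)
    (hr : ∀ p ∈ news, pvRank l p.1 < pvRank l s) :
    (news.map (fun p => 4 ^ pvRank l p.1)).sum < 4 ^ pvRank l s := by
  cases news with
  | nil =>
    simp only [List.map_nil, List.sum_nil]
    positivity
  | cons q qs =>
    have hpos : 1 ≤ pvRank l s := by
      have := hr q (by simp)
      omega
    have hb : ∀ y ∈ ((q :: qs).map (fun p => 4 ^ pvRank l p.1)), y ≤ 4 ^ (pvRank l s - 1) := by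
      intro y hy
      rcases List.mem_map.mp hy with ⟨p, hp, rfl⟩
      have := hr p hp
      exact Nat.pow_le_pow_right (by norm_num) (by omega)
    have hsum := List.sum_le_card_nsmul _ _ hb
    simp only [smul_eq_mul, List.length_map] at hsum
    have hmul : (q :: qs).length * 4 ^ (pvRank l s - 1) ≤ 3 * 4 ^ (pvRank l s - 1) :=
      Nat.mul_le_mul_right _ hlen
    have hpow : 4 ^ pvRank l s = 4 * 4 ^ (pvRank l s - 1) := by
      conv_lhs => rw [show pvRank l s = (pvRank l s - 1) + 1 from by omega]
      rw [pow_succ]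
      ring
    have hp0 : 0 < 4 ^ (pvRank l s - 1) := Nat.pow_pos (by norm_num)
    omega

-- hit test and pushes for one popped state: Python's 'for i in [-1, 0, 1]' body,
-- compressed (output-faithfully) into "return True if any case hits, else push all valid cases".
def hitA (stones : List Int) (t s k : Int) : Bool :=
  ([k - 1, k, k + 1] : List Int).any (fun d => decide (0 < d) && stones.contains (s + d) && decide (s + d = t))

-- appended in order -1, 0, 1 and popped from the end ⇒ head of our stack list is the i = +1 case
def pushesA (stones : List Int) (s k : Int) : List (Int × Int) :=
  ((([k - 1, k, k + 1] : List Int).filter (fun d => decide (0 < d) && stones.contains (s + d))).map (fun d => (s + d, d))).reverse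

def loopA (stones : List Int) (t : Int) (stack : List (Int × Int)) : Bool :=
  match stack with
  | [] => false
  | (s, k) :: rest =>
    if hitA stones t s k then true
    else loopA stones t (pushesA stones s k ++ rest)
termination_by pvMeasure stones stack
decreasing_by
  simp only [pvMeasure, List.map_append, List.sum_append, List.map_cons, List.sum_cons]
  have hlen : (pushesA stones s k).length ≤ 3 := by
    simp only [pushesA, List.length_reverse, List.length_map]
    have := List.length_filter_le (fun d => decide (0 < d) && stones.contains (s + d)) ([k - 1, k, k + 1] : List Int)
    simpa using this
  have hr : ∀ p ∈ pushesA stones s k, pvRank stones p.1 < pvRank stones s := by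
    intro p hp
    simp only [pushesA, List.mem_reverse, List.mem_map, List.mem_filter] at hp
    rcases hp with ⟨d, ⟨_, hcond⟩, rfl⟩
    simp only [Bool.and_eq_true, decide_eq_true_eq, List.contains_iff_mem] at hcond
    exact pvRank_lt hcond.2 (by omega)
  have := pvMeasure_step hlen hr
  omega

def frog_cross_river (stones : List Int) : Bool :=
  loopA stones ((PySem.List.pyGet? stones (-1)).getD 0) [(0, 1)]

-- ===== PORT B =====
-- the successors of one state (s, k): (s + d, d) for d in (k-1, k, k+1) with d > 0 landing on a stone
def succsOf (ss : PySem.Set Int) (p : Int × Int) : List (Int × Int) :=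
  (([p.2 - 1, p.2, p.2 + 1] : List Int).filter
      (fun d => decide (0 < d) && PySem.Set.contains ss (p.1 + d))).map
    (fun d => (p.1 + d, d))

-- a static finite superset of all states the saturation can ever hold (for termination only):
-- the initial state, and (landing stone, landing stone − previous position) for any two positions
-- all successors of the current state set, one whole round at a time
def allSuccs (ss : PySem.Set Int) (states : PySem.Set (Int × Int)) : List (Int × Int) :=
  states.flatMap (succsOf ss)

def univB (stones : List Int) : List (Int × Int) :=
  (0, 1) :: stones.flatMap (fun x => ((0 : Int) :: stones).map (fun s => (x, x - s)))

theorem univB_fst {stones : List Int} {p : Int × Int} (hp : p ∈ univB stones) :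
    p.1 = 0 ∨ p.1 ∈ stones := by
  simp only [univB, List.mem_cons, List.mem_flatMap, List.mem_map] at hp
  rcases hp with rfl | ⟨x, hx, s, _, rfl⟩
  · exact Or.inl rfl
  · exact Or.inr hx

theorem univB_closed (stones : List Int) :
    ∀ p ∈ univB stones, ∀ q ∈ succsOf (PySem.Set.ofList stones) p, q ∈ univB stones := by
  intro p hp q hq
  simp only [succsOf, List.mem_map, List.mem_filter, Bool.and_eq_true, decide_eq_true_eq] at hq
  rcases hq with ⟨d, ⟨_, _, hcond⟩, rfl⟩
  have hmem : p.1 + d ∈ stones :=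
    (PySem.Set.mem_ofList _ _).mp ((PySem.Set.contains_iff _ _).mp hcond)
  simp only [univB, List.mem_cons, List.mem_flatMap, List.mem_map]
  refine Or.inr ⟨p.1 + d, hmem, p.1, ?_, by ring_nf⟩
  rcases univB_fst hp with h | h
  · simp [h]
  · simp [h]

theorem update_sub_univ {ss : PySem.Set Int} {univ : List (Int × Int)}
    (hcl : ∀ p ∈ univ, ∀ q ∈ succsOf ss p, q ∈ univ)
    {states : PySem.Set (Int × Int)} (hsub : ∀ p ∈ states, p ∈ univ)
    {fresh : List (Int × Int)} (hfr : ∀ q ∈ fresh, q ∈ allSuccs ss states) :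
    ∀ p ∈ PySem.Set.update states fresh, p ∈ univ := by
  intro p hp
  rcases (PySem.Set.mem_update _ _ _).mp hp with h | h
  · exact hsub p h
  · rcases List.mem_flatMap.mp (hfr p h) with ⟨p0, hp0, hq⟩
    exact hcl p0 (hsub p0 hp0) p hq

theorem filter_length_lt {α : Type} {l : List α} {P Q : α → Bool}
    (himp : ∀ x, Q x = true → P x = true) {x0 : α} (hx0 : x0 ∈ l)
    (hP : P x0 = true) (hQ : Q x0 = false) :
    (l.filter Q).length < (l.filter P).length := by
  induction l with
  | nil => cases hx0
  | cons a as ih =>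
    have hle : (as.filter Q).length ≤ (as.filter P).length := by
      apply List.Sublist.length_le
      apply List.monotone_filter_right
      intro y hy
      exact himp y hy
    rcases List.mem_cons.mp hx0 with rfl | hmem
    · simp [hP, hQ]
      omega
    · have := ih hmem
      by_cases hqa : Q a
      · have hpa := himp a hqa
        simp only [List.filter_cons, hqa, hpa, if_true, List.length_cons]
        omega
      · by_cases hpa : P a <;> simp [hqa, hpa] <;> omega

-- one saturation round: compute ALL successors of the current state set at once,
-- test for a hit, stop at a fixed point, otherwise absorb the fresh states
def loopFix (ss : PySem.Set Int) (t : Int) (univ : List (Int × Int))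
    (hcl : ∀ p ∈ univ, ∀ q ∈ succsOf ss p, q ∈ univ)
    (states : PySem.Set (Int × Int)) (hsub : ∀ p ∈ states, p ∈ univ) : Bool :=
  if (allSuccs ss states).any (fun q => decide (q.1 = t)) then true
  else
    if hfr : (allSuccs ss states).filter (fun q => !(PySem.Set.contains states q)) = []
    then false
    else
      loopFix ss t univ hcl
        (PySem.Set.update states
          ((allSuccs ss states).filter (fun q => !(PySem.Set.contains states q))))
        (update_sub_univ hcl hsub (fun q hq => List.mem_of_mem_filter hq))
termination_by (univ.filter (fun p => !(PySem.Set.contains states p))).length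
decreasing_by
  rcases List.exists_mem_of_ne_nil _ hfr with ⟨q0, hq0⟩
  have hq0s := List.mem_of_mem_filter hq0
  have hq0u : q0 ∈ univ := by
    rcases List.mem_flatMap.mp hq0s with ⟨p0, hp0, hq⟩
    exact hcl p0 (hsub p0 hp0) q0 hq
  have hq0new : PySem.Set.contains states q0 = false := by
    have := (List.mem_filter.mp hq0).2
    simpa using this
  have himp : ∀ x : Int × Int,
      (!(PySem.Set.contains (PySem.Set.update states
        ((allSuccs ss states).filter (fun q => !(PySem.Set.contains states q)))) x)) = true →
      (!(PySem.Set.contains states x)) = true := by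
    intro x hx
    simp only [Bool.not_eq_true'] at hx ⊢
    by_contra hcon
    simp only [Bool.not_eq_false] at hcon
    have hxmem := (PySem.Set.contains_iff _ _).mp hcon
    have hxin : x ∈ PySem.Set.update states
        ((allSuccs ss states).filter (fun q => !(PySem.Set.contains states q))) :=
      (PySem.Set.mem_update _ _ _).mpr (Or.inl hxmem)
    rw [(PySem.Set.contains_iff _ _).mpr hxin] at hx
    cases hx
  have hP : (!(PySem.Set.contains states q0)) = true := by
    rw [Bool.not_eq_true']
    exact hq0new
  have hQ : (!(PySem.Set.contains (PySem.Set.update states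
      ((allSuccs ss states).filter (fun q => !(PySem.Set.contains states q)))) q0)) = false := by
    rw [Bool.not_eq_false']
    apply (PySem.Set.contains_iff _ _).mpr
    exact (PySem.Set.mem_update _ _ _).mpr (Or.inr hq0)
  exact filter_length_lt himp hq0u hP hQ

def frog_cross_river_alt (stones : List Int) : Bool :=
  match stones with
  | [] => false
  | a :: l =>
    loopFix (PySem.Set.ofList (a :: l)) (PySem.List.pyGetD (a :: l) (-1) 0)
      (univB (a :: l)) (univB_closed (a :: l)) (PySem.Set.ofList [(0, 1)])
      (by
        intro p hp
        have hps : p = (0, 1) := by simpa using (PySem.Set.mem_ofList _ _).mp hp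
        subst hps
        exact List.mem_cons_self ..)

-- ===== PRECONDITION & SPEC =====
def Spec_frog_cross_river (stones : List Int) (out : Bool) : Prop := out = frog_cross_river_alt stones
instance (stones : List Int) (out : Bool) : Decidable (Spec_frog_cross_river stones out) := by unfold Spec_frog_cross_river; infer_instance

-- ===== CLAIM (what is proved, stated in full; the proofs are below) =====
def Claim_equal_frog_cross_river : Prop := ∀ (stones : List Int), Dom_frog_cross_river stones → Spec_frog_cross_river stones (frog_cross_river stones)

-- ===== LEMMAS AND PROOFS =====

-- the frog can succeed starting from state (s, k): some chain of valid jumps reaches t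
inductive Good (stones : List Int) (t : Int) : Int → Int → Prop where
  | hit : ∀ s k d, d ∈ ([k - 1, k, k + 1] : List Int) → 0 < d → s + d ∈ stones → s + d = t → Good stones t s k
  | step : ∀ s k d, d ∈ ([k - 1, k, k + 1] : List Int) → 0 < d → s + d ∈ stones → Good stones t (s + d) d → Good stones t s k

theorem good_congr {l₁ l₂ : List Int} {t s k : Int} (hm : ∀ x, x ∈ l₁ ↔ x ∈ l₂)
    (h : Good l₁ t s k) : Good l₂ t s k := by
  induction h with
  | hit s k d hd hpos hmem hhit => exact Good.hit s k d hd hpos ((hm _).mp hmem) hhit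
  | step s k d hd hpos hmem _ ih => exact Good.step s k d hd hpos ((hm _).mp hmem) ih

theorem hitA_iff {stones : List Int} {t s k : Int} :
    hitA stones t s k = true ↔ ∃ d ∈ ([k - 1, k, k + 1] : List Int), 0 < d ∧ s + d ∈ stones ∧ s + d = t := by
  simp [hitA, and_assoc]

theorem mem_pushesA {stones : List Int} {s k : Int} {p : Int × Int} :
    p ∈ pushesA stones s k ↔ ∃ d ∈ ([k - 1, k, k + 1] : List Int), 0 < d ∧ s + d ∈ stones ∧ (s + d, d) = p := by
  simp [pushesA, and_assoc]

theorem loopA_true_iff {stones : List Int} {t : Int} (stack : List (Int × Int)) :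
    loopA stones t stack = true ↔ ∃ p ∈ stack, Good stones t p.1 p.2 := by
  fun_induction loopA stones t stack with
  | case1 => simp
  | case2 s k rest hhit =>
    simp only [true_iff]
    rcases hitA_iff.mp hhit with ⟨d, hd, hpos, hmem, hhit'⟩
    exact ⟨(s, k), by simp, Good.hit s k d hd hpos hmem hhit'⟩
  | case3 s k rest hhit ih =>
    rw [ih]
    constructor
    · rintro ⟨p, hp, hg⟩
      rcases List.mem_append.mp hp with hp' | hp'
      · rcases mem_pushesA.mp hp' with ⟨d, hd, hpos, hmem, rfl⟩
        exact ⟨(s, k), by simp, Good.step s k d hd hpos hmem hg⟩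
      · exact ⟨p, by simp [hp'], hg⟩
    · rintro ⟨p, hp, hg⟩
      rcases List.mem_cons.mp hp with rfl | hp'
      · cases hg with
        | hit s k d hd hpos hmem hhit' =>
          exact absurd (hitA_iff.mpr ⟨d, hd, hpos, hmem, hhit'⟩) (by simp [hhit])
        | step s k d hd hpos hmem hg' =>
          exact ⟨(s + d, d), List.mem_append_left _ (mem_pushesA.mpr ⟨d, hd, hpos, hmem, rfl⟩), hg'⟩
      · exact ⟨p, List.mem_append_right _ hp', hg⟩

theorem mem_succsOf {ss : PySem.Set Int} {s k : Int} {q : Int × Int} :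
    q ∈ succsOf ss (s, k) ↔ ∃ d ∈ ([k - 1, k, k + 1] : List Int), 0 < d ∧ s + d ∈ ss ∧ (s + d, d) = q := by
  simp [succsOf, and_assoc]

theorem mem_allSuccs {ss : PySem.Set Int} {states : PySem.Set (Int × Int)} {q : Int × Int} :
    q ∈ allSuccs ss states ↔ ∃ p ∈ states, q ∈ succsOf ss p := List.mem_flatMap

-- a state set that is closed under successors and whose successors never hit t contains no winning state
theorem closed_no_good {ss : PySem.Set Int} {t : Int} {S : List (Int × Int)}
    (hnohit : ∀ p ∈ S, ∀ q ∈ succsOf ss p, q.1 ≠ t)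
    (hclosed : ∀ p ∈ S, ∀ q ∈ succsOf ss p, q ∈ S) :
    ∀ p ∈ S, ¬ Good ss t p.1 p.2 := by
  suffices hh : ∀ s k : Int, Good ss t s k → (s, k) ∈ S → False by
    intro p hp hg
    exact hh p.1 p.2 hg (by simpa using hp)
  intro s k hg
  induction hg with
  | hit s k d hd hpos hmem hhit =>
    intro hin
    exact hnohit (s, k) hin (s + d, d) (mem_succsOf.mpr ⟨d, hd, hpos, hmem, rfl⟩) hhit
  | step s k d hd hpos hmem hg ih =>
    intro hin
    exact ih (hclosed (s, k) hin (s + d, d) (mem_succsOf.mpr ⟨d, hd, hpos, hmem, rfl⟩))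

theorem loopFix_true_iff (ss : PySem.Set Int) (t : Int) (univ : List (Int × Int))
    (hcl : ∀ p ∈ univ, ∀ q ∈ succsOf ss p, q ∈ univ)
    (states : PySem.Set (Int × Int)) (hsub : ∀ p ∈ states, p ∈ univ) :
    loopFix ss t univ hcl states hsub = true ↔ ∃ p ∈ states, Good ss t p.1 p.2 := by
  fun_induction loopFix ss t univ hcl states hsub with
  | case1 states hsub hany =>
    simp only [true_iff]
    simp only [List.any_eq_true, decide_eq_true_eq] at hany
    rcases hany with ⟨q, hq, hq1⟩
    rcases mem_allSuccs.mp hq with ⟨p0, hp0, hqs⟩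
    rcases mem_succsOf.mp (by exact hqs) with ⟨d, hd, hpos, hmem, rfl⟩
    exact ⟨p0, hp0, Good.hit p0.1 p0.2 d hd hpos hmem hq1⟩
  | case2 states hsub hany hfix =>
    simp only [Bool.false_eq_true, false_iff]
    rintro ⟨p, hp, hg⟩
    have hnohit : ∀ p ∈ states, ∀ q ∈ succsOf ss p, q.1 ≠ t := by
      intro p hp q hq hq1
      exact hany (List.any_eq_true.mpr ⟨q, mem_allSuccs.mpr ⟨p, hp, hq⟩, by simp [hq1]⟩)
    have hclosed : ∀ p ∈ states, ∀ q ∈ succsOf ss p, q ∈ states := by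
      intro p hp q hq
      by_contra hnot
      have hqf : q ∈ (allSuccs ss states).filter (fun q => !(PySem.Set.contains states q)) := by
        apply List.mem_filter.mpr
        refine ⟨mem_allSuccs.mpr ⟨p, hp, hq⟩, ?_⟩
        simp only [Bool.not_eq_true']
        apply (Bool.not_eq_true _).mp
        intro hc
        exact hnot ((PySem.Set.contains_iff _ _).mp hc)
      rw [hfix] at hqf
      cases hqf
    exact closed_no_good hnohit hclosed p hp hg
  | case3 states hsub hany hfix ih =>
    rw [ih]
    constructor
    · rintro ⟨p, hp, hg⟩
      rcases (PySem.Set.mem_update _ _ _).mp hp with hp' | hp'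
      · exact ⟨p, hp', hg⟩
      · rcases mem_allSuccs.mp (List.mem_of_mem_filter hp') with ⟨p0, hp0, hq⟩
        rcases mem_succsOf.mp (by exact hq) with ⟨d, hd, hpos, hmem, rfl⟩
        exact ⟨p0, hp0, Good.step p0.1 p0.2 d hd hpos hmem hg⟩
    · rintro ⟨p, hp, hg⟩
      exact ⟨p, (PySem.Set.mem_update _ _ _).mpr (Or.inl hp), hg⟩

theorem alt_true_iff (stones : List Int) (h : stones ≠ []) :
    frog_cross_river_alt stones = true ↔ Good stones ((PySem.List.pyGet? stones (-1)).getD 0) 0 1 := by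
  cases stones with
  | nil => exact absurd rfl h
  | cons a l =>
    have ht : PySem.List.pyGetD (a :: l) (-1) 0 = (PySem.List.pyGet? (a :: l) (-1)).getD 0 := by
      rw [PySem.List.pyGetD_neg_one (h := by simp), PySem.List.pyGet?_neg_one]
      rw [List.getLast?_eq_some_getLast (by simp)]
      rfl
    have hmm : ∀ x : Int, x ∈ PySem.Set.ofList (a :: l) ↔ x ∈ a :: l :=
      fun x => PySem.Set.mem_ofList (a :: l) x
    rw [show frog_cross_river_alt (a :: l) =
      loopFix (PySem.Set.ofList (a :: l)) (PySem.List.pyGetD (a :: l) (-1) 0)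
        (univB (a :: l)) (univB_closed (a :: l)) (PySem.Set.ofList [(0, 1)]) _ from rfl]
    rw [loopFix_true_iff, ht]
    constructor
    · rintro ⟨p, hp, hg⟩
      have hps : p = (0, 1) := by simpa using (PySem.Set.mem_ofList _ _).mp hp
      subst hps
      exact good_congr hmm hg
    · intro hg
      refine ⟨(0, 1), (PySem.Set.mem_ofList _ _).mpr (by simp), ?_⟩
      exact good_congr (fun x => (hmm x).symm) hg

-- ===== VERDICT (by name: the statement is the Claim_ definition above) =====
theorem frog_cross_river_spec : Claim_equal_frog_cross_river := by
  unfold Claim_equal_frog_cross_river Spec_frog_cross_river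
  intro stones _
  by_cases hne : stones = []
  · subst hne
    have hA : frog_cross_river [] = false := by
      rw [show frog_cross_river [] = loopA [] ((PySem.List.pyGet? ([] : List Int) (-1)).getD 0) [(0, 1)] from rfl]
      rw [Bool.eq_false_iff]
      intro htrue
      rcases (loopA_true_iff _).mp htrue with ⟨p, _, hg⟩
      cases hg with
      | hit _ _ _ _ _ hmem _ => simp at hmem
      | step _ _ _ _ _ hmem _ => simp at hmem
    rw [hA]
    rfl
  · have hA : frog_cross_river stones = true ↔
        Good stones ((PySem.List.pyGet? stones (-1)).getD 0) 0 1 := by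
      rw [show frog_cross_river stones =
        loopA stones ((PySem.List.pyGet? stones (-1)).getD 0) [(0, 1)] from rfl, loopA_true_iff]
      simp
    have hiff := hA.trans (alt_true_iff stones hne).symm
    cases hvA : frog_cross_river stones <;> cases hvB : frog_cross_river_alt stones <;> simp_all
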